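-- pv_equiv track=rewrite | github.com/Brunorobson/Quest-es-Beecrown | Python/Grafos/bee_1855.py | dfs
-- ===== SOURCE A (Python) =====
-- def dfs(x, y, mapa, visitados):
--     largura = len(mapa[0])
--     altura = len(mapa)
--
--     # Verifica se está dentro dos limites do mapa
--     if x < 0 or x >= largura or y < 0 or y >= altura:
--         return False
--
--     # Verifica se já visitou este ponto
--     if visitados[y][x]:
--         return False
--
--     # Marca o ponto atual como visitado
--     visitados[y][x] = True
--
--     # Verifica se encontrou o baú de obsidiana
--     if mapa[y][x] == '*':
--         return True
--
--     # Move-se para o próximo ponto de acordo com a direção indicada pela flecha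
--     if mapa[y][x] == '>':
--         return dfs(x + 1, y, mapa, visitados)
--     elif mapa[y][x] == '<':
--         return dfs(x - 1, y, mapa, visitados)
--     elif mapa[y][x] == 'v':
--         return dfs(x, y + 1, mapa, visitados)
--     elif mapa[y][x] == '^':
--         return dfs(x, y - 1, mapa, visitados)
--     else:
--         return False
-- ===== SOURCE B (Python) =====
-- DIRS = {'>': (1, 0), '<': (-1, 0), 'v': (0, 1), '^': (0, -1)}
--
--
-- def dfs(x, y, mapa, visitados):
--     while 0 <= x < len(mapa[0]) and 0 <= y < len(mapa):
--         if visitados[y][x]: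
--             return False
--         visitados[y][x] = True
--         c = mapa[y][x]
--         if c == '*':
--             return True
--         d = DIRS.get(c)
--         if d is None:
--             return False
--         x += d[0]
--         y += d[1]
--     return False
-- ===== Notes on version B (the rewrite author's own statement) =====
-- stated objective: simpler
-- what changed: The tail-recursive chain walk is rewritten as one iterative while-loop over (x, y) with the four arrow directions factored into a lookup table, preserving the exact visited-marking order and mutation.
-- outside the precondition, e.g. on dfs(0, 0, [], []): A raises IndexError, B raises IndexError; on dfs(0, 0, [['>', 'x']], [[False]]): A raises IndexError, B raises IndexError; on dfs(0, 0, [['*'], ['a', 'b']], [[False], [False, False]]): A returns True, B returns True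
import Mathlib
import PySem

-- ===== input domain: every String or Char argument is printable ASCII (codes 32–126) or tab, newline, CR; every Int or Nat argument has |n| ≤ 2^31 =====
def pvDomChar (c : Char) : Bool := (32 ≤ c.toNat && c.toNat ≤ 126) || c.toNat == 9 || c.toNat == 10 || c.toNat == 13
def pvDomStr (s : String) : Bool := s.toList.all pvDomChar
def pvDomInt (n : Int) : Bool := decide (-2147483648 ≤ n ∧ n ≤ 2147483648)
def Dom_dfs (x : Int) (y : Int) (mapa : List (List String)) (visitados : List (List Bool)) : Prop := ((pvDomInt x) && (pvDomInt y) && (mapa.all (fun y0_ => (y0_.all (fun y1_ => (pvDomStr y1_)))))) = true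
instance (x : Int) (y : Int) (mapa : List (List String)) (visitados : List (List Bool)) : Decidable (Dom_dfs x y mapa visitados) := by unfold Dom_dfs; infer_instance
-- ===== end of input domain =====

-- ===== PORT A =====
-- Header: A mutates `visitados` in place; the equivalence proved here is about the RETURN
-- value only (the Python B performs the same mutation). B replaces the tail recursion by an
-- iterative loop with a direction table ('simpler'); fuel is only a totality guard.
def dfsGoA (fuel : Nat) (x : Int) (y : Int) (mapa : List (List String)) (visitados : List (List Bool)) : Bool :=
  match fuel with
  | 0 => false
  | Nat.succ f =>
    let largura : Int := ((mapa.headI).length : Int)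
    let altura : Int := (mapa.length : Int)
    if x < 0 ∨ largura ≤ x ∨ y < 0 ∨ altura ≤ y then false
    else
      let yi := y.toNat
      let xi := x.toNat
      if (visitados.getD yi []).getD xi false then false
      else
        let vis' := visitados.set yi ((visitados.getD yi []).set xi true)
        let c := (mapa.getD yi []).getD xi ""
        if c = "*" then true
        else if c = ">" then dfsGoA f (x + 1) y mapa vis'
        else if c = "<" then dfsGoA f (x - 1) y mapa vis'
        else if c = "v" then dfsGoA f x (y + 1) mapa vis'
        else if c = "^" then dfsGoA f x (y - 1) mapa vis'
        else false

def dfs (x : Int) (y : Int) (mapa : List (List String)) (visitados : List (List Bool)) : Bool :=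
  dfsGoA (mapa.length * (mapa.headI).length + 1) x y mapa visitados

-- ===== PORT B =====
def dfsDirs : PySem.Dict String (Int × Int) :=
  PySem.Dict.ofList [(">", (1, 0)), ("<", (-1, 0)), ("v", (0, 1)), ("^", (0, -1))]

def dfsLoopB (fuel : Nat) (x : Int) (y : Int) (mapa : List (List String)) (visitados : List (List Bool)) : Bool :=
  match fuel with
  | 0 => false
  | Nat.succ f =>
    if 0 ≤ x ∧ x < ((mapa.headI).length : Int) ∧ 0 ≤ y ∧ y < (mapa.length : Int) then
      if (visitados.getD y.toNat []).getD x.toNat false then false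
      else
        let vis' := visitados.set y.toNat ((visitados.getD y.toNat []).set x.toNat true)
        let c := (mapa.getD y.toNat []).getD x.toNat ""
        if c = "*" then true
        else
          match dfsDirs.get? c with
          | none => false
          | some d => dfsLoopB f (x + d.1) (y + d.2) mapa vis'
    else false

def dfs_alt (x : Int) (y : Int) (mapa : List (List String)) (visitados : List (List Bool)) : Bool :=
  dfsLoopB (mapa.length * (mapa.headI).length + 1) x y mapa visitados

-- ===== PRECONDITION & SPEC =====
-- Pre_ excludes exactly the inputs where the Python A raises IndexError: the empty map
-- (len(mapa[0])), and in-bounds starts on grids whose mapa/visitados rows do not all have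
-- the full rectangular shape, on which the walk can index past a row end or past the end of
-- visitados (a few ragged grids on which the walk happens to stay inside still return; they
-- are excluded with this same shape condition).
def Pre_dfs (x : Int) (y : Int) (mapa : List (List String)) (visitados : List (List Bool)) : Prop :=
  mapa ≠ [] ∧
  ((x < 0 ∨ ((mapa.headI).length : Int) ≤ x ∨ y < 0 ∨ (mapa.length : Int) ≤ y) ∨
   ((∀ r ∈ mapa, r.length = (mapa.headI).length) ∧
    visitados.length = mapa.length ∧
    (∀ r ∈ visitados, r.length = (mapa.headI).length)))
instance (x : Int) (y : Int) (mapa : List (List String)) (visitados : List (List Bool)) : Decidable (Pre_dfs x y mapa visitados) := by unfold Pre_dfs; infer_instance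
def pvWitness_dfs : Int × Int × List (List String) × List (List Bool) := (0, 0, [[">", "*"]], [[false, false]])
def Spec_dfs (x : Int) (y : Int) (mapa : List (List String)) (visitados : List (List Bool)) (out : Bool) : Prop := out = dfs_alt x y mapa visitados
instance (x : Int) (y : Int) (mapa : List (List String)) (visitados : List (List Bool)) (out : Bool) : Decidable (Spec_dfs x y mapa visitados out) := by unfold Spec_dfs; infer_instance

-- ===== CLAIM (what is proved, stated in full; the proofs are below) =====
def Claim_equal_dfs : Prop := ∀ (x : Int) (y : Int) (mapa : List (List String)) (visitados : List (List Bool)), Dom_dfs x y mapa visitados → Pre_dfs x y mapa visitados → Spec_dfs x y mapa visitados (dfs x y mapa visitados)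

-- ===== LEMMAS AND PROOFS =====
theorem dfsDirs_get (c : String) :
    dfsDirs.get? c =
      if c = ">" then some ((1 : Int), (0 : Int))
      else if c = "<" then some (-1, 0)
      else if c = "v" then some (0, 1)
      else if c = "^" then some (0, -1)
      else none := by
  by_cases h1 : c = ">"
  · subst h1; decide
  · by_cases h2 : c = "<"
    · subst h2; decide
    · by_cases h3 : c = "v"
      · subst h3; decide
      · by_cases h4 : c = "^"
        · subst h4; decide
        · have h : dfsDirs = PySem.Dict.mk [(">", (1, 0)), ("<", (-1, 0)), ("v", (0, 1)), ("^", (0, -1))] := by decide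
          rw [h]
          simp [PySem.Dict.get?_mk_cons, PySem.Dict.get?, Ne.symm h1, Ne.symm h2, Ne.symm h3, Ne.symm h4, h1, h2, h3, h4]

-- The two fueled loops agree step for step, for EVERY fuel value.
theorem dfsGo_eq (fuel : Nat) : ∀ (x y : Int) (mapa : List (List String)) (visitados : List (List Bool)),
    dfsGoA fuel x y mapa visitados = dfsLoopB fuel x y mapa visitados := by
  induction fuel with
  | zero => intro x y mapa visitados; rfl
  | succ f ih =>
    intro x y mapa visitados
    simp only [dfsGoA, dfsLoopB]
    by_cases hb : x < 0 ∨ ((mapa.headI).length : Int) ≤ x ∨ y < 0 ∨ (mapa.length : Int) ≤ y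
    · rw [if_pos hb, if_neg (show ¬(0 ≤ x ∧ x < ((mapa.headI).length : Int) ∧ 0 ≤ y ∧ y < (mapa.length : Int)) by omega)]
    · rw [if_neg hb, if_pos (show 0 ≤ x ∧ x < ((mapa.headI).length : Int) ∧ 0 ≤ y ∧ y < (mapa.length : Int) by omega)]
      by_cases hv : (visitados.getD y.toNat []).getD x.toNat false
      · rw [if_pos hv, if_pos hv]
      · simp only [hv, if_false, Bool.false_eq_true]
        set c := (mapa.getD y.toNat []).getD x.toNat "" with hc
        by_cases h1 : c = "*"
        · simp [h1]
        · rw [dfsDirs_get]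
          by_cases h2 : c = ">"
          · simp [h2, ih]
          · by_cases h3 : c = "<"
            · simp [h3, sub_eq_add_neg, ih]
            · by_cases h4 : c = "v"
              · simp [h4, ih]
              · by_cases h5 : c = "^"
                · simp [h5, sub_eq_add_neg, ih]
                · simp [h1, h2, h3, h4, h5]

-- ===== VERDICT (by name: the statement is the Claim_ definition above) =====
theorem dfs_spec : Claim_equal_dfs := by
  intro x y mapa visitados _ _
  unfold Spec_dfs dfs dfs_alt
  exact dfsGo_eq _ x y mapa visitados
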